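-- pv_equiv track=rewrite | github.com/Dzkmobw/HAMi-benchmark | thesis/tools/benchmark_logger.py | extract_intercept_log
-- ===== SOURCE A (Python) =====
-- def extract_intercept_log(log_text: str) -> list[str]:
--     lines = log_text.splitlines()
--     inside = False
--     collected: list[str] = []
--     for line in lines:
--         if line.strip() == "CUDA_INTERCEPT_LOG_BEGIN":
--             inside = True
--             continue
--         if line.strip() == "CUDA_INTERCEPT_LOG_END":
--             break
--         if inside:
--             collected.append(line)
--     if collected:
--         return collected
--     return [line for line in lines if line.startswith("[cuda-intercept]")]
-- ===== SOURCE B (Python) =====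
-- def extract_intercept_log(log_text: str) -> list[str]:
--     lines = log_text.splitlines()
--     BEGIN, END = "CUDA_INTERCEPT_LOG_BEGIN", "CUDA_INTERCEPT_LOG_END"
--     end_idx = next((i for i, l in enumerate(lines) if l.strip() == END), len(lines))
--     prefix = lines[:end_idx]
--     begin_idx = next((i for i, l in enumerate(prefix) if l.strip() == BEGIN), None)
--     if begin_idx is None:
--         collected = []
--     else:
--         collected = [l for l in prefix[begin_idx + 1:] if l.strip() != BEGIN]
--     if collected:
--         return collected
--     return [line for line in lines if line.startswith("[cuda-intercept]")]
-- ===== Notes on version B (the rewrite author's own statement) =====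
-- stated objective: alternative
-- what changed: Replaces the stateful inside-flag scan with explicit marker location: find the first END index, slice the prefix, find the first BEGIN inside it, and take the slice after it filtered of interior BEGIN lines.
import Mathlib
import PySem

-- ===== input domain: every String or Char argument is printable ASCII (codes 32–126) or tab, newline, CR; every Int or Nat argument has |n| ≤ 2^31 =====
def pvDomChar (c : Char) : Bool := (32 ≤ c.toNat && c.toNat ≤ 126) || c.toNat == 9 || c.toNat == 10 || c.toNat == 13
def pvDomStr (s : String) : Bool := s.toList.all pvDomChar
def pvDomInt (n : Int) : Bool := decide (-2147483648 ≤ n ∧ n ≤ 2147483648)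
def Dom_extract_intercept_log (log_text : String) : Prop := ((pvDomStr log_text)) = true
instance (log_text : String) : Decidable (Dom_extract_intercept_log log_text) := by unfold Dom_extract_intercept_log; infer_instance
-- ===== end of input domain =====

-- B replaces A's stateful inside-flag scan by explicit marker location with findIdx/take/drop/filter (alternative decomposition, same cost).

def pvBegin : String := "CUDA_INTERCEPT_LOG_BEGIN"
def pvEnd : String := "CUDA_INTERCEPT_LOG_END"

-- ===== PORT A =====
-- the for-loop with `inside` flag, `continue` on BEGIN, `break` on END
def pvLoopA : List String → Bool → List String → List String
  | [], _, coll => coll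
  | l :: rest, inside, coll =>
    if PySem.Str.strip l == pvBegin then pvLoopA rest true coll
    else if PySem.Str.strip l == pvEnd then coll
    else if inside then pvLoopA rest inside (coll ++ [l]) else pvLoopA rest inside coll

def extract_intercept_log (log_text : String) : List String :=
  let lines := PySem.Str.splitlines log_text
  let collected := pvLoopA lines false []
  if collected ≠ [] then collected
  else lines.filter (fun line => PySem.Str.startswith line "[cuda-intercept]")

-- ===== PORT B =====
def extract_intercept_log_alt (log_text : String) : List String :=
  let lines := PySem.Str.splitlines log_text
  let pre := lines.take (lines.findIdx (fun l => PySem.Str.strip l == pvEnd))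
  let bi := pre.findIdx (fun l => PySem.Str.strip l == pvBegin)
  let collected :=
    if bi < pre.length then (pre.drop (bi + 1)).filter (fun l => !(PySem.Str.strip l == pvBegin))
    else []
  if collected ≠ [] then collected
  else lines.filter (fun line => PySem.Str.startswith line "[cuda-intercept]")

-- ===== PRECONDITION & SPEC =====
def Spec_extract_intercept_log (log_text : String) (out : List String) : Prop := out = extract_intercept_log_alt log_text
instance (log_text : String) (out : List String) : Decidable (Spec_extract_intercept_log log_text out) := by unfold Spec_extract_intercept_log; infer_instance

-- ===== CLAIM (what is proved, stated in full; the proofs are below) =====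
def Claim_equal_extract_intercept_log : Prop := ∀ (log_text : String), Dom_extract_intercept_log log_text → Spec_extract_intercept_log log_text (extract_intercept_log log_text)

-- ===== LEMMAS AND PROOFS =====

theorem pvBegin_ne_end : (pvBegin == pvEnd) = false := by decide

theorem pvLoopA_acc (lines : List String) : ∀ (inside : Bool) (coll : List String),
    pvLoopA lines inside coll = coll ++ pvLoopA lines inside [] := by
  induction lines with
  | nil => intro inside coll; simp [pvLoopA]
  | cons l rest ih =>
    intro inside coll
    simp only [pvLoopA]
    split_ifs with h1 h2 h3
    · exact ih true coll
    · simp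
    · rw [ih inside (coll ++ [l]), ih inside ([] ++ [l])]; simp
    · exact ih inside coll

theorem pvStripBegin_ne_end {l : String} (h : (PySem.Str.strip l == pvBegin) = true) :
    (PySem.Str.strip l == pvEnd) = false := by
  rw [eq_of_beq h]; exact pvBegin_ne_end

theorem pvLoopA_true (lines : List String) :
    pvLoopA lines true [] =
      (lines.take (lines.findIdx (fun l => PySem.Str.strip l == pvEnd))).filter
        (fun l => !(PySem.Str.strip l == pvBegin)) := by
  induction lines with
  | nil => simp [pvLoopA]
  | cons l rest ih =>
    simp only [pvLoopA, List.findIdx_cons]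
    by_cases h1 : (PySem.Str.strip l == pvBegin) = true
    · have h2 := pvStripBegin_ne_end h1
      simp only [h1, h2, if_true, cond_false, List.take_succ_cons, List.filter_cons,
        Bool.not_true, Bool.false_eq_true, if_false, ih]
    · by_cases h2 : (PySem.Str.strip l == pvEnd) = true
      · simp only [h1, h2, if_false, if_true, cond_true, List.take_zero, List.filter_nil,
          Bool.false_eq_true]
      · rw [pvLoopA_acc rest true ([] ++ [l])]
        simp only [h1, h2, if_false, if_true, cond_false, List.take_succ_cons,
          List.filter_cons, Bool.not_false, Bool.false_eq_true, ih, List.nil_append,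
          List.singleton_append]

theorem pvLoopA_false (lines : List String) :
    pvLoopA lines false [] =
      (let pre := lines.take (lines.findIdx (fun l => PySem.Str.strip l == pvEnd));
       let bi := pre.findIdx (fun l => PySem.Str.strip l == pvBegin);
       if bi < pre.length then (pre.drop (bi + 1)).filter (fun l => !(PySem.Str.strip l == pvBegin))
       else []) := by
  induction lines with
  | nil => simp [pvLoopA]
  | cons l rest ih =>
    simp only [pvLoopA, List.findIdx_cons]
    by_cases h1 : (PySem.Str.strip l == pvBegin) = true
    · have h2 := pvStripBegin_ne_end h1
      simp only [h1, h2, if_true, cond_false, List.take_succ_cons, List.findIdx_cons, cond_true,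
        List.length_cons, List.drop_succ_cons, List.drop_zero]
      rw [if_pos (Nat.succ_pos _)]
      exact pvLoopA_true rest
    · by_cases h2 : (PySem.Str.strip l == pvEnd) = true
      · simp only [h1, h2, if_false, if_true, cond_true, List.take_zero, List.findIdx_nil,
          List.length_nil, Nat.lt_irrefl, Bool.false_eq_true]
      · rw [ih]
        simp only [h1, h2, if_false, cond_false, List.take_succ_cons, List.findIdx_cons,
          List.length_cons, List.drop_succ_cons, Bool.false_eq_true, Nat.add_lt_add_iff_right]

-- ===== VERDICT (by name: the statement is the Claim_ definition above) =====
theorem extract_intercept_log_spec : Claim_equal_extract_intercept_log := by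
  intro log_text _
  unfold Spec_extract_intercept_log extract_intercept_log extract_intercept_log_alt
  simp only [pvLoopA_false]
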